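-- pv_equiv track=rewrite | github.com/pypi-data/pypi-mirror-28 | packages/dochap_tool/dochap_tool-1.2.0.tar.gz/dochap_tool-1.2.0/dochap_tool/gtf_utils/parser.py | get_transcripts_like_id
-- ===== SOURCE A (Python) =====
-- def get_gene_symbol_of_transcript_id(transcripts_dict, transcript_id):
--     """
--     @description get the gene_symbol of a given transcript_id from the user gtf data
--     @param transcripts_dict (dict)
--     @param transcript_id (string)
--     @return (None|string)
--     """
--     if transcript_id in transcripts_dict:
--         t_list = transcripts_dict[transcript_id]
--         if len(t_list) > 0:
--             return t_list[0]['gene_symbol'].lower()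
--     return None
--
-- def get_transcripts_like_id(transcripts_dict, transcript_id):
--     """
--     @description get all transcripts that have the same gene symbol as the given transcriptid
--     @param transcripts_dict (dict)
--     @param transcript_id (string)
--     @return (dict)
--     """
--     symbol = get_gene_symbol_of_transcript_id(transcripts_dict, transcript_id)
--     if not symbol:
--         return None
--
--     def query_function(transcript_list, symbol):
--         if len(transcript_list) > 0:
--             return transcript_list[0]['gene_symbol'].lower() == symbol
--
--     transcripts_by_gene = {
--             t_id: t_list for
--             t_id, t_list in transcripts_dict.items() if
--             query_function(t_list, symbol)
--     }
--     return transcripts_by_gene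
-- ===== SOURCE B (Python) =====
-- def get_transcripts_like_id(transcripts_dict, transcript_id):
--     t_list = transcripts_dict.get(transcript_id)
--     if not t_list:
--         return None
--     symbol = t_list[0]['gene_symbol'].lower()
--     if not symbol:
--         return None
--     groups = {}
--     for t_id, tl in transcripts_dict.items():
--         if tl:
--             groups.setdefault(tl[0]['gene_symbol'].lower(), []).append((t_id, tl))
--     return dict(groups[symbol])
-- ===== Notes on version B (the rewrite author's own statement) =====
-- stated objective: alternative
-- what changed: A filters the dict with a predicate comparing each entry's symbol to the query symbol; B instead computes the query symbol via .get with early returns, builds a grouping index symbol->entries in one pass with setdefault/append, and returns the query symbol's group as a dict.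
import Mathlib
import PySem

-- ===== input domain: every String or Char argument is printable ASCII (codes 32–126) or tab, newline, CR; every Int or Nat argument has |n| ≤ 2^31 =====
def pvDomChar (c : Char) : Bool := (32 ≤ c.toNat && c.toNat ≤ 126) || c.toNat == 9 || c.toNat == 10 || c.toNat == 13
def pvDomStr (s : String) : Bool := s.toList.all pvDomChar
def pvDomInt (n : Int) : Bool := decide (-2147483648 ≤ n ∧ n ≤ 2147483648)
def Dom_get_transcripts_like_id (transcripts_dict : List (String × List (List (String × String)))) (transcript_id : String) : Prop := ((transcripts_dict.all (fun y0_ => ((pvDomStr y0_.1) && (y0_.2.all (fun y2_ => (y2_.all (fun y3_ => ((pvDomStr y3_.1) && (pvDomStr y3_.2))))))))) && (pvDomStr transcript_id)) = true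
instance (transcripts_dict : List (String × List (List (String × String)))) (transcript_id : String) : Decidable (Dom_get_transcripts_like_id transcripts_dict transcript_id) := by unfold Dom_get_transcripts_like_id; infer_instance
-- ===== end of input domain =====

-- B replaces A's predicate-filter comprehension by a grouping index (symbol -> entries) built in one
-- pass with setdefault/append, followed by a single lookup (objective: alternative, same cost).


-- ===== PORT A =====
-- t_list[0]['gene_symbol'] is ported with getD "": the KeyError case ('gene_symbol' absent) is excluded by Pre_.
def get_gene_symbol_of_transcript_id (transcripts_dict : List (String × List (List (String × String)))) (transcript_id : String) : Option String :=
  let d := PySem.Dict.ofList transcripts_dict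
  if d.contains transcript_id then
    match d.getD transcript_id [] with
    | [] => none
    | h :: _ => some (PySem.Str.lower ((PySem.Dict.ofList h).getD "gene_symbol" ""))
  else none

def get_transcripts_like_id (transcripts_dict : List (String × List (List (String × String)))) (transcript_id : String) : Option (List (String × List (List (String × String)))) :=
  match get_gene_symbol_of_transcript_id transcripts_dict transcript_id with
  | none => none
  | some symbol =>
    if symbol == "" then none   -- 'if not symbol' on a string
    else some ((PySem.Dict.ofList transcripts_dict).items.filter (fun p =>
      match p.2 with
      | [] => false             -- query_function returns None (falsy) on an empty list
      | h :: _ => PySem.Str.lower ((PySem.Dict.ofList h).getD "gene_symbol" "") == symbol))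

-- ===== PORT B =====
def get_transcripts_like_id_alt (transcripts_dict : List (String × List (List (String × String)))) (transcript_id : String) : Option (List (String × List (List (String × String)))) :=
  let d := PySem.Dict.ofList transcripts_dict
  match d.get? transcript_id with         -- transcripts_dict.get(transcript_id); 'if not t_list'
  | some (h :: _) =>
    let symbol := PySem.Str.lower ((PySem.Dict.ofList h).getD "gene_symbol" "")
    if symbol == "" then none
    else
      -- groups.setdefault(sym, []).append((t_id, tl))  ==  modify sym [] (· ++ [(t_id, tl)])
      let groups := d.items.foldl
        (fun (g : PySem.Dict String (List (String × List (List (String × String))))) p =>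
          match p.2 with
          | [] => g
          | h' :: _ => g.modify (PySem.Str.lower ((PySem.Dict.ofList h').getD "gene_symbol" "")) [] (· ++ [p]))
        PySem.Dict.empty
      some ((PySem.Dict.ofList (groups.getD symbol [])).items)   -- dict(groups[symbol])
  | _ => none

-- ===== PRECONDITION & SPEC =====
def pvHeadKeyOK (tl : List (List (String × String))) : Bool :=
  tl.head?.elim true (fun h => (PySem.Dict.ofList h).contains "gene_symbol")

-- Pre_ excludes exactly the inputs on which Python A raises KeyError: the queried transcript's first
-- exon dict lacks 'gene_symbol', or the computed symbol is truthy and some other nonempty transcript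
-- list's first dict lacks 'gene_symbol'.
def Pre_get_transcripts_like_id (transcripts_dict : List (String × List (List (String × String)))) (transcript_id : String) : Prop :=
  ((((PySem.Dict.ofList transcripts_dict).get? transcript_id).bind List.head?).elim true (fun h =>
    ((PySem.Dict.ofList h).get? "gene_symbol").elim false (fun v =>
      (PySem.Str.lower v == "") ||
        (PySem.Dict.ofList transcripts_dict).items.all (fun p => pvHeadKeyOK p.2)))) = true
instance (transcripts_dict : List (String × List (List (String × String)))) (transcript_id : String) : Decidable (Pre_get_transcripts_like_id transcripts_dict transcript_id) := by unfold Pre_get_transcripts_like_id; infer_instance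

def pvWitness_get_transcripts_like_id : (List (String × List (List (String × String)))) × String :=
  ([("t1", [[("gene_symbol", "Abc")]]), ("t2", [[("gene_symbol", "abc")]]), ("t3", [])], "t1")

def Spec_get_transcripts_like_id (transcripts_dict : List (String × List (List (String × String)))) (transcript_id : String) (out : Option (List (String × List (List (String × String))))) : Prop := out = get_transcripts_like_id_alt transcripts_dict transcript_id
instance (transcripts_dict : List (String × List (List (String × String)))) (transcript_id : String) (out : Option (List (String × List (List (String × String))))) : Decidable (Spec_get_transcripts_like_id transcripts_dict transcript_id out) := by unfold Spec_get_transcripts_like_id; infer_instance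

-- ===== CLAIM (what is proved, stated in full; the proofs are below) =====
def Claim_equal_get_transcripts_like_id : Prop := ∀ (transcripts_dict : List (String × List (List (String × String)))) (transcript_id : String), Dom_get_transcripts_like_id transcripts_dict transcript_id → Pre_get_transcripts_like_id transcripts_dict transcript_id → Spec_get_transcripts_like_id transcripts_dict transcript_id (get_transcripts_like_id transcripts_dict transcript_id)

-- ===== LEMMAS AND PROOFS =====

-- the grouping fold collects, under each symbol, exactly the entries A's filter keeps (in order)
theorem pv_group_getD (l : List (String × List (List (String × String))))
    (g : PySem.Dict String (List (String × List (List (String × String))))) (sym : String) :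
    (l.foldl
      (fun (g : PySem.Dict String (List (String × List (List (String × String))))) p =>
        match p.2 with
        | [] => g
        | h' :: _ => g.modify (PySem.Str.lower ((PySem.Dict.ofList h').getD "gene_symbol" "")) [] (· ++ [p]))
      g).getD sym []
    = g.getD sym [] ++ l.filter (fun p =>
        match p.2 with
        | [] => false
        | h :: _ => PySem.Str.lower ((PySem.Dict.ofList h).getD "gene_symbol" "") == sym) := by
  induction l generalizing g with
  | nil => simp
  | cons p l ih =>
    match hp : p.2 with
    | [] =>
      simp only [List.foldl_cons, List.filter_cons, hp, ih]
      simp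
    | h' :: t =>
      simp only [List.foldl_cons, List.filter_cons, hp, ih, PySem.Dict.getD_modify]
      by_cases hs : sym = PySem.Str.lower ((PySem.Dict.ofList h').getD "gene_symbol" "")
      · simp [hs]
      · simp [hs, Ne.symm hs, beq_iff_eq]

-- dict(pairs) with pairwise-distinct keys has exactly those pairs as items
theorem pv_items_ofList {ν : Type} (l : List (String × ν)) (h : (l.map Prod.fst).Nodup) :
    (PySem.Dict.ofList l).items = l := by
  have := PySem.Dict.items_foldl_insert_fresh l Prod.fst Prod.snd PySem.Dict.empty
    (fun a _ => by simp [PySem.Dict.contains_empty]) h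
  simpa [PySem.Dict.ofList, PySem.Dict.update] using this

-- ===== VERDICT (by name: the statement is the Claim_ definition above) =====
theorem get_transcripts_like_id_spec : Claim_equal_get_transcripts_like_id := by
  intro td tid _dom _pre
  unfold Spec_get_transcripts_like_id get_transcripts_like_id get_transcripts_like_id_alt
    get_gene_symbol_of_transcript_id
  dsimp only
  rw [PySem.Dict.contains_eq_isSome_get?, PySem.Dict.getD_eq_get?_getD]
  match hget : (PySem.Dict.ofList td).get? tid with
  | none => simp
  | some [] => simp
  | some (h :: t) =>
    simp only [Option.isSome_some, if_true, Option.getD_some]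
    by_cases hsym : PySem.Str.lower ((PySem.Dict.ofList h).getD "gene_symbol" "") = ""
    · simp [hsym]
    · have hne : (PySem.Str.lower ((PySem.Dict.ofList h).getD "gene_symbol" "") == "") = false := by
        simp [hsym]
      simp only [hne, Bool.false_eq_true, if_false]
      rw [pv_group_getD, PySem.Dict.getD_empty, List.nil_append]
      have hnd : (((PySem.Dict.ofList td).items.filter (fun p =>
          match p.2 with
          | [] => false
          | h' :: _ => PySem.Str.lower ((PySem.Dict.ofList h').getD "gene_symbol" "") ==
              PySem.Str.lower ((PySem.Dict.ofList h).getD "gene_symbol" ""))).map Prod.fst).Nodup :=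
        (PySem.Dict.nodup_keys_ofList td).sublist
          ((List.filter_sublist (l := (PySem.Dict.ofList td).items)).map Prod.fst)
      rw [pv_items_ofList _ hnd]
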